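-- pv_equiv track=rewrite | github.com/Shimwell/paramak-2 | src/paramak/utils.py | instructions_from_points
-- ===== SOURCE A (Python) =====
-- def instructions_from_points(points):
--     # obtains the first two values of the points list
--     XZ_points = [(p[0], p[1]) for p in points]
--
--     # obtains the last values of the points list
--     connections = [p[2] for p in points[:-1]]
--
--     current_linetype = connections[0]
--     current_points_list = []
--     instructions = []
--     # groups together common connection types
--     for i, connection in enumerate(connections):
--         if connection == current_linetype:
--             current_points_list.append(XZ_points[i])
--         else:
--             current_points_list.append(XZ_points[i])
--             instructions.append({current_linetype: current_points_list})
--             current_linetype = connection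
--             current_points_list = [XZ_points[i]]
--     instructions.append({current_linetype: current_points_list})
--
--     if list(instructions[-1].values())[0][-1] != XZ_points[0]:
--         keyname = list(instructions[-1].keys())[0]
--         instructions[-1][keyname].append(XZ_points[0])
--     return instructions
-- ===== SOURCE B (Python) =====
-- def instructions_from_points(points):
--     xz = [(p[0], p[1]) for p in points]
--     conns = [p[2] for p in points[:-1]]
--
--     # recursive run decomposition: peel the leading run of equal connection
--     # types off (xzs, cs), sharing the boundary point with the next run
--     def build(xzs, cs):
--         linetype = cs[0]
--         k = 1
--         while k < len(cs) and cs[k] == linetype: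
--             k += 1
--         if k == len(cs):
--             return [{linetype: xzs[:k]}]
--         return [{linetype: xzs[:k + 1]}] + build(xzs[k:], cs[k:])
--
--     instructions = build(xz, conns)
--     last = list(instructions[-1].values())[0]
--     if last[-1] != xz[0]:
--         last.append(xz[0])
--     return instructions
-- ===== Notes on version B (the rewrite author's own statement) =====
-- stated objective: alternative
-- what changed: Replaces A's single accumulator loop with mutable (current_linetype, current_points_list, instructions) state by a recursive run decomposition that peels the leading run of equal connection types off the lists, slicing the points for each run and sharing the boundary point with the next run.
import Mathlib
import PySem

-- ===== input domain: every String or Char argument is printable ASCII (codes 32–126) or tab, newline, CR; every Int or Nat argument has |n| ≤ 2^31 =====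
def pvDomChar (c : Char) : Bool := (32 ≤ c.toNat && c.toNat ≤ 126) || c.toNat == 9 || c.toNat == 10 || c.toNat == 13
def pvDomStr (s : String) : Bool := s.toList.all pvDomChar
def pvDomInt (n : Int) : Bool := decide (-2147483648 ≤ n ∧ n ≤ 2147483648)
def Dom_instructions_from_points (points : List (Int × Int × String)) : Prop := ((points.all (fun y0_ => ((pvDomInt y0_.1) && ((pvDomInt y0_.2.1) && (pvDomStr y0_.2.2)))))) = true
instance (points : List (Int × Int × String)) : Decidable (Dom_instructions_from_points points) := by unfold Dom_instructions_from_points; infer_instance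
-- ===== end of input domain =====

-- B re-implements A by a recursive run decomposition (peel the leading run of equal
-- connection types, sharing the boundary point) instead of A's single accumulator loop;
-- objective: alternative decomposition, same cost. Return-value equivalence only
-- (the Python A mutates its intermediate dicts in place; nothing escapes the function).

-- ===== PORT A =====
-- A-side helper: the body of A's `for i, connection in enumerate(connections)` loop;
-- state = (current_linetype, current_points_list, instructions)
def stepA (XZ : List (Int × Int))
    (st : String × List (Int × Int) × List (List (String × List (Int × Int))))
    (ic : Int × String) : String × List (Int × Int) × List (List (String × List (Int × Int))) :=
  -- XZ_points[i]; i is always in range here, the default is never read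
  let xi := (PySem.List.pyGet? XZ ic.1).getD (0, 0)
  if ic.2 == st.1 then (st.1, st.2.1 ++ [xi], st.2.2)
  else (ic.2, [xi], st.2.2 ++ [[(st.1, st.2.1 ++ [xi])]])

-- A-side helper: the final close-the-loop step (mutates the last instruction in place)
def closeA (XZ : List (Int × Int)) (instrs : List (List (String × List (Int × Int)))) :
    List (List (String × List (Int × Int))) :=
  let lastD := (PySem.List.pyGet? instrs (-1)).getD []          -- instructions[-1]
  let x0 := (PySem.List.pyGet? XZ 0).getD (0, 0)                -- XZ_points[0]
  if (PySem.List.pyGet? ((PySem.List.pyGet? (lastD.map Prod.snd) 0).getD []) (-1)).getD (0, 0) != x0 then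
    let keyname := (PySem.List.pyGet? (lastD.map Prod.fst) 0).getD ""
    -- instructions[-1][keyname].append(XZ_points[0])
    instrs.dropLast ++ [lastD.map (fun kv => if kv.1 == keyname then (kv.1, kv.2 ++ [x0]) else kv)]
  else instrs

def instructions_from_points (points : List (Int × Int × String)) : List (List (String × List (Int × Int))) :=
  let XZ := points.map (fun p => (p.1, p.2.1))
  let connections := (PySem.List.slice points none (some (-1))).map (fun p => p.2.2)
  match PySem.List.pyGet? connections 0 with
  | none => []      -- connections[0] raises IndexError; excluded by Pre_
  | some c0 =>
    let st := (PySem.List.enumerate connections).foldl (stepA XZ) (c0, [], [])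
    closeA XZ (st.2.2 ++ [[(st.1, st.2.1)]])

-- ===== PORT B =====
-- B-side helper: the `while k < len(cs) and cs[k] == linetype: k += 1` scan (k = 1 + this)
def runLen (lt : String) : List String → Nat
  | [] => 0
  | c :: cs => if c == lt then 1 + runLen lt cs else 0

-- B-side helper: Source B's recursive `build`
def buildB : List (Int × Int) → List String → List (List (String × List (Int × Int)))
  | _, [] => []          -- cs[0] raises IndexError; excluded by Pre_
  | xzs, linetype :: rest =>
    let k := 1 + runLen linetype rest
    if k = rest.length + 1 then [[(linetype, xzs.take k)]]
    else [(linetype, xzs.take (k + 1))] :: buildB (xzs.drop k) ((linetype :: rest).drop k)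
termination_by _xzs cs => cs.length
decreasing_by simp

-- B-side helper: Source B's closing step (`last` aliases the first value of the last dict)
def closeB (xz : List (Int × Int)) (instructions : List (List (String × List (Int × Int)))) :
    List (List (String × List (Int × Int))) :=
  let last := (PySem.List.pyGet? (((PySem.List.pyGet? instructions (-1)).getD []).map Prod.snd) 0).getD []
  let x0 := (PySem.List.pyGet? xz 0).getD (0, 0)
  if (PySem.List.pyGet? last (-1)).getD (0, 0) != x0 then
    instructions.dropLast ++
      [match (PySem.List.pyGet? instructions (-1)).getD [] with
       | [] => []
       | (key, v) :: restEntries => (key, v ++ [x0]) :: restEntries]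
  else instructions

def instructions_from_points_alt (points : List (Int × Int × String)) : List (List (String × List (Int × Int))) :=
  let xz := points.map (fun p => (p.1, p.2.1))
  let conns := (PySem.List.slice points none (some (-1))).map (fun p => p.2.2)
  closeB xz (buildB xz conns)

-- ===== PRECONDITION & SPEC =====
-- A (and B) raise IndexError via connections[0] when len(points) ≤ 1; Pre_ excludes exactly those.
def Pre_instructions_from_points (points : List (Int × Int × String)) : Prop := 2 ≤ points.length
instance (points : List (Int × Int × String)) : Decidable (Pre_instructions_from_points points) := by
  unfold Pre_instructions_from_points; infer_instance

def pvWitness_instructions_from_points : (List (Int × Int × String)) :=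
  [(0, 0, "straight"), (1, 2, "straight")]

def Spec_instructions_from_points (points : List (Int × Int × String)) (out : List (List (String × List (Int × Int)))) : Prop := out = instructions_from_points_alt points
instance (points : List (Int × Int × String)) (out : List (List (String × List (Int × Int)))) : Decidable (Spec_instructions_from_points points out) := by unfold Spec_instructions_from_points; infer_instance

-- ===== CLAIM (what is proved, stated in full; the proofs are below) =====
def Claim_equal_instructions_from_points : Prop := ∀ (points : List (Int × Int × String)), Dom_instructions_from_points points → Pre_instructions_from_points points → Spec_instructions_from_points points (instructions_from_points points)

-- ===== LEMMAS AND PROOFS =====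

-- Recursive rendering of A's loop: what the fold computes, with the trailing
-- `instructions.append({current_linetype: current_points_list})` already attached.
def Fspec (XZ : List (Int × Int)) (lt : String) (cur : List (Int × Int)) :
    List (Int × String) → List (List (String × List (Int × Int)))
  | [] => [[(lt, cur)]]
  | ic :: rest =>
    let xi := (PySem.List.pyGet? XZ ic.1).getD (0, 0)
    if ic.2 == lt then Fspec XZ lt (cur ++ [xi]) rest
    else [(lt, cur ++ [xi])] :: Fspec XZ ic.2 [xi] rest

theorem foldA_eq (XZ : List (Int × Int)) :
    ∀ (zs : List (Int × String)) (lt : String) (cur : List (Int × Int))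
      (acc : List (List (String × List (Int × Int)))),
      (zs.foldl (stepA XZ) (lt, cur, acc)).2.2 ++
        [[((zs.foldl (stepA XZ) (lt, cur, acc)).1, (zs.foldl (stepA XZ) (lt, cur, acc)).2.1)]] =
      acc ++ Fspec XZ lt cur zs := by
  intro zs
  induction zs with
  | nil => intro lt cur acc; simp [Fspec]
  | cons ic rest ih =>
    intro lt cur acc
    simp only [List.foldl_cons, Fspec, stepA]
    by_cases h : ic.2 == lt
    · simp [h, ih]
    · simp [h, ih]

theorem main_lemma (XZ : List (Int × Int)) :
    ∀ (cs : List String) (off : Nat) (lt : String) (cur : List (Int × Int)),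
      off + cs.length ≤ XZ.length →
      Fspec XZ lt cur (PySem.List.enumerate cs (off : Int)) =
        (if runLen lt cs = cs.length then [[(lt, cur ++ ((XZ.drop off).take (runLen lt cs)))]]
         else [(lt, cur ++ ((XZ.drop off).take (runLen lt cs + 1)))] ::
           buildB (XZ.drop (off + runLen lt cs)) (cs.drop (runLen lt cs))) := by
  intro cs
  induction cs with
  | nil => intro off lt cur h; simp [Fspec, runLen, PySem.List.enumerate_nil]
  | cons c cs' ih =>
    intro off lt cur h
    have hoff : off < XZ.length := by simp at h; omega
    have hdrop : XZ.drop off = XZ[off] :: XZ.drop (off + 1) :=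
      (List.getElem_cons_drop hoff).symm
    have hcast : (off : Int) + 1 = ((off + 1 : Nat) : Int) := by push_cast; ring
    rw [PySem.List.enumerate_cons]
    simp only [Fspec, PySem.List.pyGet?_natCast]
    rw [List.getElem?_eq_getElem hoff]
    simp only [Option.getD_some]
    have hts : ∀ m : Nat, (XZ.drop off).take (1 + m) = XZ[off] :: (XZ.drop (off + 1)).take m := by
      intro m
      have e : 1 + m = m + 1 := Nat.add_comm 1 m
      rw [e, ← List.getElem_cons_drop hoff, List.take_succ_cons]
    by_cases hc : (c == lt) = true
    · rw [if_pos hc, hcast, ih (off + 1) lt (cur ++ [XZ[off]]) (by simp at h ⊢; omega)]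
      have hrl : runLen lt (c :: cs') = 1 + runLen lt cs' := by simp [runLen, hc]
      rw [hrl]
      by_cases hk : runLen lt cs' = cs'.length
      · rw [if_pos hk, if_pos (by simp; omega), hts]
        simp
      · rw [if_neg hk, if_neg (by simp; omega)]
        have h1 : off + (1 + runLen lt cs') = off + 1 + runLen lt cs' := by omega
        have h2 : (c :: cs').drop (1 + runLen lt cs') = cs'.drop (runLen lt cs') := by
          rw [Nat.add_comm]; exact List.drop_succ_cons
        have e2 : 1 + runLen lt cs' + 1 = 1 + (runLen lt cs' + 1) := by omega
        rw [h1, h2, e2, hts]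
        simp
    · have hrl : runLen lt (c :: cs') = 0 := by simp [runLen, hc]
      rw [if_neg hc, hrl, if_neg (by simp)]
      simp only [Nat.add_zero, List.drop_zero]
      have htake1 : (XZ.drop off).take (0 + 1) = [XZ[off]] := by
        have := hts 0
        simpa using this
      rw [htake1, hcast, ih (off + 1) c [XZ[off]] (by simp at h ⊢; omega)]
      rw [buildB]
      by_cases hk : runLen c cs' = cs'.length
      · rw [if_pos hk, if_pos (by omega), hts]
        simp
      · rw [if_neg hk, if_neg (by omega)]
        have h1 : XZ.drop (off + 1 + runLen c cs') = (XZ.drop off).drop (1 + runLen c cs') := by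
          rw [List.drop_drop]; congr 1; omega
        have h2 : (c :: cs').drop (1 + runLen c cs') = cs'.drop (runLen c cs') := by
          rw [Nat.add_comm]; exact List.drop_succ_cons
        have e2 : 1 + runLen c cs' + 1 = 1 + (runLen c cs' + 1) := by omega
        rw [h1, h2, e2, hts]
        simp

theorem buildB_head (XZ : List (Int × Int)) (c : String) (cs' : List String)
    (h : cs'.length + 1 ≤ XZ.length) :
    Fspec XZ c [] (PySem.List.enumerate (c :: cs') 0) = buildB XZ (c :: cs') := by
  have h0 : (0 : Int) = ((0 : Nat) : Int) := by norm_num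
  rw [h0, main_lemma XZ (c :: cs') 0 c [] (by simpa using h)]
  have hrl : runLen c (c :: cs') = 1 + runLen c cs' := by simp [runLen]
  rw [hrl, buildB]
  by_cases hk : runLen c cs' = cs'.length
  · rw [if_pos (by simp; omega), if_pos (by omega)]
    simp
  · rw [if_neg (by simp; omega), if_neg (by omega)]
    simp

theorem close_eq (XZ : List (Int × Int)) (pre : List (List (String × List (Int × Int))))
    (k : String) (v : List (Int × Int)) :
    closeA XZ (pre ++ [[(k, v)]]) = closeB XZ (pre ++ [[(k, v)]]) := by
  simp [closeA, closeB, PySem.List.pyGet?_neg_one_append_singleton]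

-- ===== VERDICT (by name: the statement is the Claim_ definition above) =====
theorem instructions_from_points_spec : Claim_equal_instructions_from_points := by
  intro points _ hpre
  unfold Spec_instructions_from_points
  unfold instructions_from_points instructions_from_points_alt
  simp only [PySem.List.slice_to_neg_one]
  have hlen : 1 ≤ points.dropLast.length := by
    unfold Pre_instructions_from_points at hpre
    simp [List.length_dropLast]
    omega
  obtain ⟨q, qs, hql⟩ : ∃ q qs, points.dropLast = q :: qs := by
    cases hd : points.dropLast with
    | nil => rw [hd] at hlen; simp at hlen
    | cons a b => exact ⟨a, b, rfl⟩
  rw [hql]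
  simp only [List.map_cons, PySem.List.pyGet?_zero_cons]
  rw [close_eq]
  congr 1
  rw [foldA_eq]
  rw [List.nil_append]
  apply buildB_head
  have h1 : points.dropLast.length + 1 = points.length := by
    unfold Pre_instructions_from_points at hpre
    simp [List.length_dropLast]; omega
  rw [hql] at h1
  simp at h1 ⊢
  omega
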